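-- pv_equiv track=rewrite | github.com/gasbugs/mulcam-aws-infra-automation-terraform | workshop-management/utils/credentials.py | filter_credentials
-- ===== SOURCE A (Python) =====
-- def filter_credentials(credentials: list[dict], account_filter: str | None) -> list[dict]:
--     """
--     --filter 플래그 값으로 처리할 계정을 걸러낸다.
--
--     account_filter 형식:
--       "1-5"   → 계정 1, 2, 3, 4, 5
--       "1,3,5" → 계정 1, 3, 5
--       None    → 전체 계정
--
--     계정 번호는 name 필드의 "계정 N"에서 N을 파싱한다.
--     """
--     if account_filter is None:
--         return credentials
--
--     # 포함할 계정 번호 집합 계산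
--     indices: set[int] = set()
--     for part in account_filter.split(","):
--         part = part.strip()
--         if "-" in part:
--             start, end = part.split("-", 1)
--             indices.update(range(int(start), int(end) + 1))
--         else:
--             indices.add(int(part))
--
--     return [c for c in credentials if _account_number(c) in indices]
--
-- def _account_number(cred: dict) -> int:
--     """자격증명 dict의 name 필드에서 계정 번호를 추출한다."""
--     try:
--         return int(cred["name"].split()[-1])
--     except (ValueError, IndexError, KeyError):
--         return -1
-- ===== SOURCE B (Python) =====
-- def filter_credentials(credentials: list[dict], account_filter: str | None) -> list[dict]:
--     if account_filter is None:
--         return credentials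
--
--     # parse each comma part into one (lo, hi) interval; no integer set is materialized
--     intervals = [_interval(p) for p in account_filter.split(",")]
--
--     matched = []
--     for c in credentials:
--         if _covered(_account_number(c), intervals):
--             matched.append(c)
--     return matched
--
-- def _interval(part: str) -> tuple[int, int]:
--     p = part.strip()
--     if "-" in p:
--         s, e = p.split("-", 1)
--         return (int(s), int(e))
--     v = int(p)
--     return (v, v)
--
-- def _covered(n: int, intervals: list) -> bool:
--     if not intervals:
--         return False
--     lo, hi = intervals[0]
--     return (lo <= n <= hi) or _covered(n, intervals[1:])
--
-- def _account_number(cred: dict) -> int: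
--     name = cred.get("name")
--     if name is None:
--         return -1
--     words = name.split()
--     if not words:
--         return -1
--     try:
--         return int(words[-1])
--     except ValueError:
--         return -1
-- ===== Notes on version B (the rewrite author's own statement) =====
-- stated objective: alternative
-- what changed: B parses each comma part into a (lo,hi) interval via a list comprehension and keeps a credential (explicit accumulator loop) when a recursive interval-containment test succeeds, instead of materializing every integer of each range into a set and filtering by set membership; the account-number helper is also decomposed into explicit None/empty checks instead of one try/except.
import Mathlib
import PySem

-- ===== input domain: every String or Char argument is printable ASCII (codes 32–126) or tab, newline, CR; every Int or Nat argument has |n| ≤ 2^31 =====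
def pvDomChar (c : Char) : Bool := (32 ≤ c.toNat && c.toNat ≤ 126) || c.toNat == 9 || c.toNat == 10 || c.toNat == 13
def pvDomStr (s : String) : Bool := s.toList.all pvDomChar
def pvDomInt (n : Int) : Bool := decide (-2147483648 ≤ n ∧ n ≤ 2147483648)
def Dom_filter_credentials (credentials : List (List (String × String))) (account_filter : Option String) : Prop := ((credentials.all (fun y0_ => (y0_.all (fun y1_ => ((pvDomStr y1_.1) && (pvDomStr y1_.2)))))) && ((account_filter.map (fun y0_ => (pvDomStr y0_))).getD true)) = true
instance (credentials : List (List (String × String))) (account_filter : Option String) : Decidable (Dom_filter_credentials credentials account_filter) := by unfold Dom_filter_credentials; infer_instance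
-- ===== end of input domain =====

-- B parses each comma part into one (lo, hi) interval (list comprehension) and keeps a
-- credential via a recursive interval-containment test, instead of materializing every
-- integer of each range into a set; alternative decomposition, same results.

-- ===== PORT A =====
-- A's _account_number: one try/except around the whole chain
def pvAcct (cred : List (String × String)) : Int :=
  match (PySem.Dict.mk cred).get? "name" with
  | none => -1                                   -- KeyError → -1
  | some s =>
    match PySem.List.pyGet? (PySem.Str.split₀ s) (-1) with
    | none => -1                                 -- IndexError → -1
    | some w =>
      match PySem.Int.ofStr? w with
      | none => -1                               -- ValueError → -1
      | some n => n

-- one iteration of A's set-building loop; none = int() raised ValueError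
def pvStepA (acc : Option (PySem.Set Int)) (part : String) : Option (PySem.Set Int) :=
  match acc with
  | none => none
  | some ind =>
    let p := PySem.Str.strip part
    if PySem.Str.isIn "-" p then
      match PySem.Str.splitMax? p "-" 1 with
      | some (st :: en :: _) =>
        match PySem.Int.ofStr? st, PySem.Int.ofStr? en with
        | some a, some b => some (PySem.Set.update ind (PySem.List.pyRange a (b + 1) 1))
        | _, _ => none
      | _ => none
    else
      match PySem.Int.ofStr? p with
      | none => none
      | some n => some (PySem.Set.add ind n)

def filter_credentials (credentials : List (List (String × String))) (account_filter : Option String) : List (List (String × String)) :=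
  match account_filter with
  | none => credentials
  | some s =>
    match ((PySem.Str.split? s ",").getD []).foldl pvStepA (some PySem.Set.empty) with
    | none => []                                 -- Python raises ValueError here; outside Pre_
    | some indices => credentials.filter (fun c => PySem.Set.contains indices (pvAcct c))

-- ===== PORT B =====
-- B's _account_number: explicit None / empty-word-list checks, try only around int()
def pvAcctB (cred : List (String × String)) : Int :=
  match (PySem.Dict.mk cred).get? "name" with
  | none => -1
  | some name =>
    let words := PySem.Str.split₀ name
    if words.isEmpty then -1
    else
      match words.getLast? with
      | none => -1                               -- unreachable: words nonempty
      | some w => (PySem.Int.ofStr? w).getD (-1) -- ValueError → -1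

-- B's _interval: one comma part to one (lo, hi) pair; none = int() raised ValueError
def pvInterval? (part : String) : Option (Int × Int) :=
  let p := PySem.Str.strip part
  if PySem.Str.isIn "-" p then
    match PySem.Str.splitMax? p "-" 1 with
    | some (st :: en :: _) =>
      match PySem.Int.ofStr? st, PySem.Int.ofStr? en with
      | some lo, some hi => some (lo, hi)
      | _, _ => none
    | _ => none
  else (PySem.Int.ofStr? p).map (fun v => (v, v))

-- B's list comprehension [_interval(p) for p in parts]; none = some _interval raised
def pvIntervals : List String → Option (List (Int × Int))
  | [] => some []
  | p :: rest =>
    match pvInterval? p, pvIntervals rest with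
    | some iv, some ivs => some (iv :: ivs)
    | _, _ => none

-- B's recursive _covered
def pvCovered (n : Int) : List (Int × Int) → Bool
  | [] => false
  | iv :: rest => (decide (iv.1 ≤ n) && decide (n ≤ iv.2)) || pvCovered n rest

def filter_credentials_alt (credentials : List (List (String × String))) (account_filter : Option String) : List (List (String × String)) :=
  match account_filter with
  | none => credentials
  | some s =>
    match pvIntervals ((PySem.Str.split? s ",").getD []) with
    | none => []                                 -- Python raises ValueError here; outside Pre_
    | some ivs =>
      credentials.foldl
        (fun matched c => if pvCovered (pvAcctB c) ivs then matched ++ [c] else matched) []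

-- ===== PRECONDITION & SPEC =====
-- a comma part is well formed when every piece int() sees parses (no ValueError)
def pvPartOk (part : String) : Bool :=
  let p := PySem.Str.strip part
  if PySem.Str.isIn "-" p then
    match PySem.Str.splitMax? p "-" 1 with
    | some (st :: en :: _) => (PySem.Int.ofStr? st).isSome && (PySem.Int.ofStr? en).isSome
    | _ => false
  else (PySem.Int.ofStr? p).isSome

-- Pre_ excludes exactly the filters on which A's int() raises ValueError (B raises there too)
def Pre_filter_credentials (credentials : List (List (String × String))) (account_filter : Option String) : Prop :=
  ((account_filter.map (fun s => ((PySem.Str.split? s ",").getD []).all pvPartOk)).getD true) = true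
instance (credentials : List (List (String × String))) (account_filter : Option String) : Decidable (Pre_filter_credentials credentials account_filter) := by unfold Pre_filter_credentials; infer_instance

def pvWitness_filter_credentials : (List (List (String × String))) × Option String :=
  ([[("name", "account 2")], [("name", "account 4")], [("other", "x")]], some " 1-3 , 7 ")

def Spec_filter_credentials (credentials : List (List (String × String))) (account_filter : Option String) (out : List (List (String × String))) : Prop := out = filter_credentials_alt credentials account_filter
instance (credentials : List (List (String × String))) (account_filter : Option String) (out : List (List (String × String))) : Decidable (Spec_filter_credentials credentials account_filter out) := by unfold Spec_filter_credentials; infer_instance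

-- ===== CLAIM (what is proved, stated in full; the proofs are below) =====
def Claim_equal_filter_credentials : Prop := ∀ (credentials : List (List (String × String))) (account_filter : Option String), Dom_filter_credentials credentials account_filter → Pre_filter_credentials credentials account_filter → Spec_filter_credentials credentials account_filter (filter_credentials credentials account_filter)

-- ===== LEMMAS AND PROOFS =====

-- the two account-number helpers agree
theorem pvAcct_eq (cred : List (String × String)) : pvAcct cred = pvAcctB cred := by
  unfold pvAcct pvAcctB
  cases (PySem.Dict.mk cred).get? "name" with
  | none => rfl
  | some s =>
    simp only [PySem.List.pyGet?_neg_one]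
    cases h : (PySem.Str.split₀ s).getLast? with
    | none => simp [List.getLast?_eq_none_iff.1 h]
    | some w =>
      have hne : ¬ (PySem.Str.split₀ s).isEmpty := by
        simp only [List.isEmpty_iff]
        intro he; rw [he] at h; simp at h
      simp only [hne, if_false]
      cases PySem.Int.ofStr? w <;> rfl

-- A's fold stays `some` and its membership matches B's interval list
theorem pvFold_align (parts : List String) (hok : parts.all pvPartOk = true)
    (S : PySem.Set Int) :
    ∃ S' L', parts.foldl pvStepA (some S) = some S' ∧
      pvIntervals parts = some L' ∧
      ∀ x : Int, x ∈ S' ↔ (x ∈ S ∨ pvCovered x L' = true) := by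
  induction parts generalizing S with
  | nil => exact ⟨S, [], rfl, rfl, by simp [pvCovered]⟩
  | cons part rest ih =>
    simp only [List.all_cons, Bool.and_eq_true] at hok
    obtain ⟨hp, hrest⟩ := hok
    unfold pvPartOk at hp
    simp only [List.foldl_cons]
    by_cases hdash : PySem.Chars.isIn ['-'] (PySem.Chars.strip part.toList) = true
    · simp [hdash] at hp
      match hsp : PySem.Str.splitMax? (PySem.Str.strip part) "-" 1 with
      | none => rw [hsp] at hp; simp at hp
      | some [] => rw [hsp] at hp; simp at hp
      | some [st] => rw [hsp] at hp; simp at hp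
      | some (st :: en :: tl) =>
        rw [hsp] at hp
        simp only [Bool.and_eq_true, Option.isSome_iff_exists] at hp
        obtain ⟨⟨a, ha⟩, ⟨b, hb⟩⟩ := hp
        have hA : pvStepA (some S) part =
            some (PySem.Set.update S (PySem.List.pyRange a (b + 1) 1)) := by
          simp [pvStepA, hdash, hsp, ha, hb]
        have hI : pvInterval? part = some (a, b) := by
          simp [pvInterval?, hdash, hsp, ha, hb]
        rw [hA]
        obtain ⟨S', L', h1, h2, h3⟩ :=
          ih hrest (PySem.Set.update S (PySem.List.pyRange a (b + 1) 1))
        refine ⟨S', (a, b) :: L', h1, by simp [pvIntervals, hI, h2], ?_⟩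
        intro x
        rw [h3 x, PySem.Set.mem_update, PySem.List.mem_pyRange_one]
        simp only [pvCovered, Bool.or_eq_true, Bool.and_eq_true, decide_eq_true_eq]
        constructor
        · rintro ((h | ⟨h1', h2'⟩) | h)
          · exact Or.inl h
          · exact Or.inr (Or.inl ⟨h1', by omega⟩)
          · exact Or.inr (Or.inr h)
        · rintro (h | ⟨h1', h2'⟩ | h)
          · exact Or.inl (Or.inl h)
          · exact Or.inl (Or.inr ⟨h1', by omega⟩)
          · exact Or.inr h
    · simp [hdash] at hp
      rw [Option.isSome_iff_exists] at hp
      obtain ⟨n, hn⟩ := hp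
      have hA : pvStepA (some S) part = some (PySem.Set.add S n) := by
        simp [pvStepA, hdash, hn]
      have hI : pvInterval? part = some (n, n) := by
        simp [pvInterval?, hdash, hn]
      rw [hA]
      obtain ⟨S', L', h1, h2, h3⟩ := ih hrest (PySem.Set.add S n)
      refine ⟨S', (n, n) :: L', h1, by simp [pvIntervals, hI, h2], ?_⟩
      intro x
      rw [h3 x, PySem.Set.mem_add]
      simp only [pvCovered, Bool.or_eq_true, Bool.and_eq_true, decide_eq_true_eq]
      constructor
      · rintro ((h | h) | h)
        · exact Or.inl h
        · exact Or.inr (Or.inl (by omega))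
        · exact Or.inr (Or.inr h)
      · rintro (h | ⟨h1', h2'⟩ | h)
        · exact Or.inl (Or.inl h)
        · exact Or.inl (Or.inr (by omega))
        · exact Or.inr h

-- ===== VERDICT (by name: the statement is the Claim_ definition above) =====
theorem filter_credentials_spec : Claim_equal_filter_credentials := by
  intro credentials account_filter _hdom hpre
  unfold Spec_filter_credentials
  match account_filter with
  | none => rfl
  | some s =>
    unfold Pre_filter_credentials at hpre
    simp only [Option.map_some, Option.getD_some] at hpre
    obtain ⟨S', L', hA, hB, hmem⟩ :=
      pvFold_align ((PySem.Str.split? s ",").getD []) hpre PySem.Set.empty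
    unfold filter_credentials filter_credentials_alt
    simp only [hA, hB]
    rw [PySem.List.foldl_append_if_eq_filter]
    simp only [List.nil_append]
    apply List.filter_congr
    intro c _
    rw [Bool.eq_iff_iff, PySem.Set.contains_iff, pvAcct_eq]
    rw [hmem (pvAcctB c)]
    simp [PySem.Set.empty]
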